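-- pv_equiv track=rewrite | github.com/paiml/depyler | examples/hard_cycle_detection.py | detect_cycle_start
-- ===== SOURCE A (Python) =====
-- def detect_cycle_start(arr: list[int], start: int) -> int:
--     """Find the start index of a cycle in a functional graph.
--     Returns -1 if no cycle found."""
--     n: int = len(arr)
--     if start < 0 or start >= n:
--         return -1
--     slow: int = start
--     fast: int = start
--     steps: int = 0
--     found: int = 0
--     while steps < n + 1:
--         slow = arr[slow]
--         fast_mid: int = arr[fast]
--         fast = arr[fast_mid]
--         steps = steps + 1
--         if slow == fast:
--             found = 1
--             steps = n + 2
--     if found == 0: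
--         return -1
--     ptr1: int = start
--     ptr2: int = slow
--     while ptr1 != ptr2:
--         ptr1 = arr[ptr1]
--         ptr2 = arr[ptr2]
--     return ptr1
-- ===== SOURCE B (Python) =====
-- def detect_cycle_start(arr: list[int], start: int) -> int:
--     """Find the start index of a cycle in a functional graph.
--     Returns -1 if no cycle found."""
--     n: int = len(arr)
--     if start < 0 or start >= n:
--         return -1
--     visited: set[int] = set()
--     node: int = start
--     while node not in visited:
--         visited.add(node)
--         node = arr[node]
--     return node
-- ===== Notes on version B (the rewrite author's own statement) =====
-- stated objective: simpler
-- what changed: Replaces Floyd's two-phase slow/fast meet-and-reset (two loops with steps/found bookkeeping) by a single walk from start that records visited nodes in a set and returns the first repeated node, which in a functional graph is exactly the cycle start.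
-- outside the precondition, e.g. on detect_cycle_start([0, 5], 0): A returns 0, B returns 0; on detect_cycle_start([0, -7], 0): A returns 0, B returns 0
import Mathlib
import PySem

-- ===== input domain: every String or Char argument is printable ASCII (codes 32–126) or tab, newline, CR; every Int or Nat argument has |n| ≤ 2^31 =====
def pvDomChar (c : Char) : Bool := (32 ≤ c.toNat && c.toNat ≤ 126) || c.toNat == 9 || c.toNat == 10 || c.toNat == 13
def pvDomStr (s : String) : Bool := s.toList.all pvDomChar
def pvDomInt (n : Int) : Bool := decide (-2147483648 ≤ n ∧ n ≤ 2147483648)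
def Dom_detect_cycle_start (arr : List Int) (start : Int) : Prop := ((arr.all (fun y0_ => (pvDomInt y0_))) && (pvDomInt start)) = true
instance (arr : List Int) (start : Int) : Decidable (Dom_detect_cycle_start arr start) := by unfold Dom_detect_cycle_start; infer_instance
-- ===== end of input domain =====

-- B replaces Floyd's two-phase slow/fast meet-and-reset by a single walk with a visited set
-- returning the first repeated node (the cycle start); objective: simpler.

-- ===== PORT A =====
-- phase 1 of A: while steps < n+1: slow = arr[slow]; fast = arr[arr[fast]]; steps += 1;
-- if slow == fast: found = 1; steps = n+2.  Returns (slow, found); on IndexError (pyGet? = none,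
-- outside Pre_) the result is unconstrained and we just stop with the current state.
def pvALoop1 (arr : List Int) (n slow fast steps found : Int) : Int × Int :=
  if _h : steps < n + 1 then
    match PySem.List.pyGet? arr slow, PySem.List.pyGet? arr fast with
    | some slow', some fastMid =>
      match PySem.List.pyGet? arr fastMid with
      | some fast' =>
        if slow' = fast' then pvALoop1 arr n slow' fast' (n + 2) 1
        else pvALoop1 arr n slow' fast' (steps + 1) found
      | none => (slow, found)
    | _, _ => (slow, found)
  else (slow, found)
termination_by (n + 1 - steps).toNat
decreasing_by all_goals omega

-- phase 2 of A: while ptr1 != ptr2: ptr1 = arr[ptr1]; ptr2 = arr[ptr2]; return ptr1.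
-- The Python loop is unbounded; the fuel only guards termination (inside Pre_ it never runs out,
-- as the equivalence proof shows); fuel exhaustion / IndexError are outside Pre_.
def pvALoop2 (arr : List Int) (fuel : Nat) (ptr1 ptr2 : Int) : Int :=
  if ptr1 = ptr2 then ptr1
  else
    match fuel with
    | 0 => 0
    | fuel' + 1 =>
      match PySem.List.pyGet? arr ptr1, PySem.List.pyGet? arr ptr2 with
      | some p1, some p2 => pvALoop2 arr fuel' p1 p2
      | _, _ => 0

def detect_cycle_start (arr : List Int) (start : Int) : Int :=
  let n : Int := arr.length
  if start < 0 ∨ start ≥ n then -1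
  else
    let r := pvALoop1 arr n start start 0 0
    if r.2 = 0 then -1
    else pvALoop2 arr (arr.length + 1) start r.1

-- ===== PORT B =====
-- B's walk: while node not in visited: visited.add(node); node = arr[node]; return node.
-- Fuel only guards termination (inside Pre_ the first repeat occurs within n+1 steps).
def pvBLoop (arr : List Int) (fuel : Nat) (visited : PySem.Set Int) (node : Int) : Int :=
  if PySem.Set.contains visited node then node
  else
    match fuel with
    | 0 => 0
    | fuel' + 1 =>
      match PySem.List.pyGet? arr node with
      | some node' => pvBLoop arr fuel' (PySem.Set.add visited node) node'
      | none => 0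

def detect_cycle_start_alt (arr : List Int) (start : Int) : Int :=
  let n : Int := arr.length
  if start < 0 ∨ start ≥ n then -1
  else pvBLoop arr (arr.length + 2) PySem.Set.empty start

-- ===== PRECONDITION & SPEC =====
-- Pre_ excludes arrays holding a successor value outside [-n, n) when start is a valid index:
-- A raises IndexError whenever its walk reaches such a value; when the bad value happens to be
-- unreachable from start, A returns and B returns the same value (see claim cites).
def Pre_detect_cycle_start (arr : List Int) (start : Int) : Prop :=
  start < 0 ∨ (arr.length : Int) ≤ start ∨
    ∀ x ∈ arr, -(arr.length : Int) ≤ x ∧ x < (arr.length : Int)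
instance (arr : List Int) (start : Int) : Decidable (Pre_detect_cycle_start arr start) := by
  unfold Pre_detect_cycle_start; infer_instance

def pvWitness_detect_cycle_start : List Int × Int := ([1, 2, 0, 1], 3)

def Spec_detect_cycle_start (arr : List Int) (start : Int) (out : Int) : Prop := out = detect_cycle_start_alt arr start
instance (arr : List Int) (start : Int) (out : Int) : Decidable (Spec_detect_cycle_start arr start out) := by unfold Spec_detect_cycle_start; infer_instance

-- ===== CLAIM (what is proved, stated in full; the proofs are below) =====
def Claim_equal_detect_cycle_start : Prop := ∀ (arr : List Int) (start : Int), Dom_detect_cycle_start arr start → Pre_detect_cycle_start arr start → Spec_detect_cycle_start arr start (detect_cycle_start arr start)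

-- ===== LEMMAS AND PROOFS =====

-- the successor function of the functional graph, and the orbit of start under it
def pvF (arr : List Int) (z : Int) : Int := (PySem.List.pyGet? arr z).getD 0
def pvX (arr : List Int) (start : Int) (k : Nat) : Int := (pvF arr)^[k] start

theorem pvX_succ (arr : List Int) (start : Int) (k : Nat) :
    pvX arr start (k + 1) = pvF arr (pvX arr start k) := by
  simp [pvX, Function.iterate_succ_apply']

theorem pvX_add (arr : List Int) (start : Int) (m t : Nat) :
    pvX arr start (m + t) = (pvF arr)^[t] (pvX arr start m) := by
  simp [pvX, Nat.add_comm m t, Function.iterate_add_apply]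

theorem pvGet_emod (arr : List Int) (z : Int)
    (h1 : -(arr.length : Int) ≤ z) (h2 : z < (arr.length : Int)) :
    PySem.List.pyGet? arr z = arr[(z % (arr.length : Int)).toNat]? := by
  by_cases hz : 0 ≤ z
  · rw [PySem.List.pyGet?_of_nonneg arr hz]
    congr 1
    have hm : z % (arr.length : Int) = z := Int.emod_eq_of_lt hz h2
    rw [hm]
  · have hL : z % (arr.length : Int) = (z + (arr.length : Int) * 1) % (arr.length : Int) := by
      rw [Int.add_mul_emod_self_left]
    have hm : (z + (arr.length : Int) * 1) % (arr.length : Int) = z + (arr.length : Int) * 1 := by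
      apply Int.emod_eq_of_lt <;> omega
    have hk : z = -(((-z).toNat : Nat) : Int) := by omega
    have hidx : (z % (arr.length : Int)).toNat = arr.length - (-z).toNat := by omega
    rw [hidx, hk, PySem.List.pyGet?_neg_natCast arr _ (by omega) (by omega)]
    rw [neg_neg, Int.toNat_natCast]

theorem pvF_get (arr : List Int) (z : Int)
    (h1 : -(arr.length : Int) ≤ z) (h2 : z < (arr.length : Int)) :
    PySem.List.pyGet? arr z = some (pvF arr z) := by
  have ht : ((z % (arr.length : Int)).toNat) < arr.length := by
    have := Int.emod_nonneg z (show (arr.length : Int) ≠ 0 by omega)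
    have := Int.emod_lt_of_pos z (show (0:Int) < arr.length by omega)
    omega
  rw [pvF, pvGet_emod arr z h1 h2, List.getElem?_eq_getElem ht]
  rfl

theorem pvF_norm (arr : List Int) (z w : Int)
    (h1 : -(arr.length : Int) ≤ z) (h2 : z < (arr.length : Int))
    (h3 : -(arr.length : Int) ≤ w) (h4 : w < (arr.length : Int))
    (h : z % (arr.length : Int) = w % (arr.length : Int)) :
    pvF arr z = pvF arr w := by
  rw [pvF, pvF, pvGet_emod arr z h1 h2, pvGet_emod arr w h3 h4, h]

theorem pvX_range (arr : List Int) (start : Int)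
    (hP : ∀ x ∈ arr, -(arr.length : Int) ≤ x ∧ x < (arr.length : Int))
    (h0 : 0 ≤ start) (h1 : start < (arr.length : Int)) (k : Nat) :
    -(arr.length : Int) ≤ pvX arr start k ∧ pvX arr start k < (arr.length : Int) := by
  induction k with
  | zero =>
    simp only [pvX, Function.iterate_zero, id]
    exact ⟨by omega, h1⟩
  | succ k ih =>
    rw [pvX_succ]
    have hm : pvF arr (pvX arr start k) ∈ arr :=
      PySem.List.mem_of_pyGet?_eq_some arr (pvF_get arr _ ih.1 ih.2)
    exact hP _ hm

-- rho-shape structure of the orbit: T = first repeat index, μ = entry point, lam = cycle length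
theorem pvKey (arr : List Int) (start : Int)
    (hP : ∀ x ∈ arr, -(arr.length : Int) ≤ x ∧ x < (arr.length : Int))
    (h0 : 0 ≤ start) (h1 : start < (arr.length : Int)) :
    ∃ T mu lam : Nat, mu + lam = T ∧ 0 < lam ∧ T ≤ arr.length + 1 ∧
      (∀ i j, i < j → j < T → pvX arr start i ≠ pvX arr start j) ∧
      (∀ i j, i ≤ j → (pvX arr start i = pvX arr start j ↔ (i = j ∨ (mu ≤ i ∧ lam ∣ j - i)))) := by
  have hrange := pvX_range arr start hP h0 h1
  have hL : 1 ≤ arr.length := by omega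
  -- pigeonhole on normalized indices: some two of x 0 .. x L collide mod L
  have hpig : ∃ i j, i < j ∧ j ≤ arr.length ∧
      pvX arr start i % (arr.length : Int) = pvX arr start j % (arr.length : Int) := by
    have hmaps : ∀ k ∈ Finset.range (arr.length + 1),
        (pvX arr start k % (arr.length : Int)).toNat ∈ Finset.range arr.length := by
      intro k _
      have h1' := Int.emod_nonneg (pvX arr start k) (show (arr.length : Int) ≠ 0 by omega)
      have h2' := Int.emod_lt_of_pos (pvX arr start k) (show (0:Int) < arr.length by omega)
      simp only [Finset.mem_range]; omega
    obtain ⟨i, hi, j, hj, hne, heq⟩ :=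
      Finset.exists_ne_map_eq_of_card_lt_of_maps_to
        (by simp) hmaps
    have hmod : pvX arr start i % (arr.length : Int) = pvX arr start j % (arr.length : Int) := by
      have h1i := Int.emod_nonneg (pvX arr start i) (show (arr.length : Int) ≠ 0 by omega)
      have h1j := Int.emod_nonneg (pvX arr start j) (show (arr.length : Int) ≠ 0 by omega)
      omega
    simp only [Finset.mem_range] at hi hj
    rcases Nat.lt_or_ge i j with h | h
    · exact ⟨i, j, h, by omega, hmod⟩
    · exact ⟨j, i, by omega, by omega, hmod.symm⟩
  obtain ⟨i0, j0, hij0, hj0, hmod0⟩ := hpig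
  have hcol : pvX arr start (i0 + 1) = pvX arr start (j0 + 1) := by
    rw [pvX_succ, pvX_succ]
    exact pvF_norm arr _ _ (hrange i0).1 (hrange i0).2 (hrange j0).1 (hrange j0).2 hmod0
  -- T = first repeat index
  haveI hdec : DecidablePred (fun k => ∃ j, j < k ∧ pvX arr start j = pvX arr start k) :=
    fun k => Classical.dec _
  have hex : ∃ k, ∃ j, j < k ∧ pvX arr start j = pvX arr start k :=
    ⟨j0 + 1, i0 + 1, by omega, hcol⟩
  set T := Nat.find hex with hTdef
  obtain ⟨mu, hmuT, hmu⟩ := Nat.find_spec hex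
  have hTle : T ≤ arr.length + 1 := le_trans (Nat.find_min' hex ⟨i0 + 1, by omega, hcol⟩) (by omega)
  have hdist : ∀ i j, i < j → j < T → pvX arr start i ≠ pvX arr start j := by
    intro i j hij hjT heq
    exact Nat.find_min hex hjT ⟨i, hij, heq⟩
  set lam := T - mu with hlamdef
  have hmulam : mu + lam = T := by omega
  have hlam : 0 < lam := by omega
  have per : ∀ a, mu ≤ a → pvX arr start (a + lam) = pvX arr start a := by
    intro a ha
    obtain ⟨t, rfl⟩ : ∃ t, a = mu + t := ⟨a - mu, by omega⟩
    have e1 : mu + t + lam = T + t := by omega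
    rw [e1, show T + t = T + t from rfl, pvX_add, show mu + t = mu + t from rfl, pvX_add, ← hmu]
  have per_mult : ∀ a c, mu ≤ a → pvX arr start (a + c * lam) = pvX arr start a := by
    intro a c ha
    induction c with
    | zero => simp
    | succ c ih =>
      have e : a + (c + 1) * lam = (a + c * lam) + lam := by ring
      rw [e, per _ (by omega), ih]
  have reduce : ∀ a, mu ≤ a → pvX arr start a = pvX arr start (mu + (a - mu) % lam) := by
    intro a ha
    have hdm := Nat.div_add_mod (a - mu) lam
    have hcomm : (a - mu) / lam * lam = lam * ((a - mu) / lam) := Nat.mul_comm _ _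
    have e : a = (mu + (a - mu) % lam) + (a - mu) / lam * lam := by omega
    calc pvX arr start a
        = pvX arr start ((mu + (a - mu) % lam) + (a - mu) / lam * lam) := by rw [← e]
      _ = pvX arr start (mu + (a - mu) % lam) := per_mult _ _ (by omega)
  refine ⟨T, mu, lam, hmulam, hlam, hTle, hdist, ?_⟩
  intro i j hij
  constructor
  · intro heq
    by_cases hieq : i = j
    · exact Or.inl hieq
    · have hlt : i < j := by omega
      right
      have hmui : mu ≤ i := by
        by_contra hcon
        have hi' : i < mu := by omega
        rcases Nat.lt_or_ge j mu with hj' | hj'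
        · exact hdist i j hlt (by omega) heq
        · have hj'' := reduce j hj'
          have hjT : mu + (j - mu) % lam < T := by
            have := Nat.mod_lt (j - mu) hlam
            omega
          exact hdist i (mu + (j - mu) % lam) (by omega) hjT (heq.trans hj'')
      refine ⟨hmui, ?_⟩
      -- shift the equality to a common index ≥ mu and reduce into the window [mu, T)
      have hshift : pvX arr start i = pvX arr start (i + (j - i)) := by
        rw [show i + (j - i) = j from by omega]; exact heq
      have hshift2 : pvX arr start (i + lam * 0) = pvX arr start (i + (j - i)) := by
        simpa using hshift
      have key : pvX arr start (mu + (i - mu) % lam)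
          = pvX arr start (mu + (i + (j - i) - mu) % lam) := by
        rw [← reduce i hmui, ← reduce (i + (j - i)) (by omega), hshift]
      have hw1 : mu + (i - mu) % lam < T := by have := Nat.mod_lt (i - mu) hlam; omega
      have hw2 : mu + (i + (j - i) - mu) % lam < T := by
        have := Nat.mod_lt (i + (j - i) - mu) hlam; omega
      have hwin : mu + (i - mu) % lam = mu + (i + (j - i) - mu) % lam := by
        by_contra hne
        rcases Nat.lt_or_ge (mu + (i - mu) % lam) (mu + (i + (j - i) - mu) % lam) with h | h
        · exact hdist _ _ h hw2 key
        · exact hdist _ _ (by omega) hw1 key.symm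
      -- from (i-mu) ≡ (i-mu)+(j-i) [MOD lam] conclude lam ∣ (j-i)
      have e : i + (j - i) - mu = (i - mu) + (j - i) := by omega
      rw [e] at hwin
      have hmodeq : Nat.ModEq lam ((i - mu) + (j - i)) ((i - mu) + 0) := by
        show ((i - mu) + (j - i)) % lam = ((i - mu) + 0) % lam
        rw [Nat.add_zero]
        omega
      have : Nat.ModEq lam (j - i) 0 := Nat.ModEq.add_left_cancel' _ hmodeq
      exact (Nat.modEq_zero_iff_dvd).mp this
  · rintro (rfl | ⟨hmui, c, hc⟩)
    · rfl
    · have e : j = i + c * lam := by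
        rcases Nat.eq_zero_or_pos lam with h | h
        · omega
        · have : c * lam = j - i := by rw [hc, Nat.mul_comm]
          omega
      rw [e, per_mult _ _ hmui]

-- B's loop returns x T (= x mu)
theorem pvBLoop_run (arr : List Int) (start : Int) (T : Nat)
    (hdist : ∀ i j, i < j → j < T → pvX arr start i ≠ pvX arr start j)
    (hrep : ∃ j, j < T ∧ pvX arr start j = pvX arr start T)
    (hrange : ∀ k, -(arr.length : Int) ≤ pvX arr start k ∧ pvX arr start k < (arr.length : Int)) :
    ∀ k fuel, k ≤ T → T + 1 ≤ fuel + k →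
      pvBLoop arr fuel ((List.range k).map (pvX arr start)) (pvX arr start k) = pvX arr start T := by
  intro k fuel
  induction fuel generalizing k with
  | zero => intro hk hf; omega
  | succ fuel ih =>
    intro hk hf
    by_cases hkT : k = T
    · subst hkT
      obtain ⟨j, hj, hxj⟩ := hrep
      have hmem : pvX arr start k ∈ (List.range k).map (pvX arr start) :=
        List.mem_map.mpr ⟨j, List.mem_range.mpr hj, hxj⟩
      have hc : PySem.Set.contains ((List.range k).map (pvX arr start)) (pvX arr start k) = true :=
        (PySem.Set.contains_iff _ _).mpr hmem
      rw [pvBLoop, if_pos hc]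
    · have hkT' : k < T := by omega
      have hnm : pvX arr start k ∉ (List.range k).map (pvX arr start) := by
        intro hmem
        obtain ⟨j, hj, hxj⟩ := List.mem_map.mp hmem
        exact hdist j k (List.mem_range.mp hj) hkT' hxj
      have hc : ¬ PySem.Set.contains ((List.range k).map (pvX arr start)) (pvX arr start k) = true := by
        rw [PySem.Set.contains_iff]; exact hnm
      have hget : PySem.List.pyGet? arr (pvX arr start k) = some (pvX arr start (k + 1)) := by
        rw [pvX_succ]; exact pvF_get arr _ (hrange k).1 (hrange k).2
      have hadd : PySem.Set.add ((List.range k).map (pvX arr start)) (pvX arr start k)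
          = (List.range (k + 1)).map (pvX arr start) := by
        rw [PySem.Set.add_of_not_mem hnm, List.range_succ, List.map_append, List.map_singleton]
      rw [pvBLoop, if_neg hc]
      simp only [hget, hadd]
      exact ih (k + 1) (by omega) (by omega)

-- A's phase-1 loop returns (x K, 1) for K the least k ≥ 1 with x k = x (2k)
theorem pvALoop1_run (arr : List Int) (start : Int) (K : Nat)
    (hK : 1 ≤ K ∧ pvX arr start K = pvX arr start (2 * K))
    (hKmin : ∀ k, 1 ≤ k → pvX arr start k = pvX arr start (2 * k) → K ≤ k)
    (hKle : K ≤ arr.length + 1)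
    (hrange : ∀ k, -(arr.length : Int) ≤ pvX arr start k ∧ pvX arr start k < (arr.length : Int)) :
    ∀ k, k < K →
      pvALoop1 arr (arr.length : Int) (pvX arr start k) (pvX arr start (2 * k)) (k : Int) 0
        = (pvX arr start K, 1) := by
  suffices h : ∀ m k, k < K → K - k ≤ m + 1 →
      pvALoop1 arr (arr.length : Int) (pvX arr start k) (pvX arr start (2 * k)) (k : Int) 0
        = (pvX arr start K, 1) by
    intro k hk; exact h K k hk (by omega)
  intro m
  induction m with
  | zero =>
    intro k hk hm
    have hke : k + 1 = K := by omega
    have hcond : (k : Int) < (arr.length : Int) + 1 := by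
      have : k < arr.length + 1 := by omega
      exact_mod_cast this
    have hget1 : PySem.List.pyGet? arr (pvX arr start k) = some (pvX arr start (k + 1)) := by
      rw [pvX_succ]; exact pvF_get arr _ (hrange k).1 (hrange k).2
    have hget2 : PySem.List.pyGet? arr (pvX arr start (2 * k)) = some (pvX arr start (2 * k + 1)) := by
      rw [pvX_succ]; exact pvF_get arr _ (hrange (2 * k)).1 (hrange (2 * k)).2
    have hget3 : PySem.List.pyGet? arr (pvX arr start (2 * k + 1)) = some (pvX arr start (2 * k + 2)) := by
      have e : pvX arr start (2 * k + 2) = pvF arr (pvX arr start (2 * k + 1)) := by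
        rw [show 2 * k + 2 = (2 * k + 1) + 1 from by omega, pvX_succ]
      rw [e]; exact pvF_get arr _ (hrange (2 * k + 1)).1 (hrange (2 * k + 1)).2
    have heq : pvX arr start (k + 1) = pvX arr start (2 * k + 2) := by
      rw [hke, show 2 * k + 2 = 2 * K from by omega]; exact hK.2
    rw [pvALoop1, dif_pos hcond]
    simp only [hget1, hget2, hget3, if_pos heq]
    rw [pvALoop1, dif_neg (by omega)]
    rw [hke]
  | succ m ih =>
    intro k hk hm
    have hcond : (k : Int) < (arr.length : Int) + 1 := by
      have : k < arr.length + 1 := by omega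
      exact_mod_cast this
    have hget1 : PySem.List.pyGet? arr (pvX arr start k) = some (pvX arr start (k + 1)) := by
      rw [pvX_succ]; exact pvF_get arr _ (hrange k).1 (hrange k).2
    have hget2 : PySem.List.pyGet? arr (pvX arr start (2 * k)) = some (pvX arr start (2 * k + 1)) := by
      rw [pvX_succ]; exact pvF_get arr _ (hrange (2 * k)).1 (hrange (2 * k)).2
    have hget3 : PySem.List.pyGet? arr (pvX arr start (2 * k + 1)) = some (pvX arr start (2 * k + 2)) := by
      have e : pvX arr start (2 * k + 2) = pvF arr (pvX arr start (2 * k + 1)) := by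
        rw [show 2 * k + 2 = (2 * k + 1) + 1 from by omega, pvX_succ]
      rw [e]; exact pvF_get arr _ (hrange (2 * k + 1)).1 (hrange (2 * k + 1)).2
    rw [pvALoop1, dif_pos hcond]
    by_cases hke : k + 1 = K
    · have heq : pvX arr start (k + 1) = pvX arr start (2 * k + 2) := by
        rw [hke, show 2 * k + 2 = 2 * K from by omega]; exact hK.2
      simp only [hget1, hget2, hget3, if_pos heq]
      rw [pvALoop1, dif_neg (by omega)]
      rw [hke]
    · have hne : pvX arr start (k + 1) ≠ pvX arr start (2 * k + 2) := by
        intro hcon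
        have : K ≤ k + 1 := hKmin (k + 1) (by omega)
          (by rw [show 2 * (k + 1) = 2 * k + 2 from by omega]; exact hcon)
        omega
      simp only [hget1, hget2, hget3, if_neg hne]
      have e3 : ((k : Int) + 1) = ((k + 1 : Nat) : Int) := by push_cast; ring
      rw [e3, show 2 * k + 2 = 2 * (k + 1) from by omega]
      exact ih (k + 1) (by omega) (by omega)

-- A's phase-2 loop, started at (x 0, x K), returns x mu
theorem pvALoop2_run (arr : List Int) (start : Int) (mu K : Nat)
    (hiff : ∀ j, pvX arr start j = pvX arr start (K + j) ↔ mu ≤ j)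
    (hrange : ∀ k, -(arr.length : Int) ≤ pvX arr start k ∧ pvX arr start k < (arr.length : Int)) :
    ∀ j fuel, j ≤ mu → mu ≤ fuel + j →
      pvALoop2 arr fuel (pvX arr start j) (pvX arr start (K + j)) = pvX arr start mu := by
  intro j fuel
  induction fuel generalizing j with
  | zero =>
    intro hj hf
    have hjm : j = mu := by omega
    have heq : pvX arr start j = pvX arr start (K + j) := (hiff j).mpr (by omega)
    rw [pvALoop2, if_pos heq, hjm]
  | succ fuel ih =>
    intro hj hf
    by_cases hjm : j = mu
    · have heq : pvX arr start j = pvX arr start (K + j) := (hiff j).mpr (by omega)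
      rw [pvALoop2, if_pos heq, hjm]
    · have hne : ¬ pvX arr start j = pvX arr start (K + j) := by
        intro hcon
        have := (hiff j).mp hcon
        omega
      have hget1 : PySem.List.pyGet? arr (pvX arr start j) = some (pvX arr start (j + 1)) := by
        rw [pvX_succ]; exact pvF_get arr _ (hrange j).1 (hrange j).2
      have hget2 : PySem.List.pyGet? arr (pvX arr start (K + j)) = some (pvX arr start (K + j + 1)) := by
        rw [pvX_succ]; exact pvF_get arr _ (hrange (K + j)).1 (hrange (K + j)).2
      rw [pvALoop2, if_neg hne]
      simp only [hget1, hget2]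
      rw [show K + j + 1 = K + (j + 1) from by omega]
      exact ih (j + 1) (by omega) (by omega)

theorem pvMain (arr : List Int) (start : Int)
    (hP : ∀ x ∈ arr, -(arr.length : Int) ≤ x ∧ x < (arr.length : Int))
    (h0 : 0 ≤ start) (h1 : start < (arr.length : Int)) :
    detect_cycle_start arr start = detect_cycle_start_alt arr start := by
  have hrange := pvX_range arr start hP h0 h1
  have hL1 : 1 ≤ arr.length := by omega
  obtain ⟨T, mu, lam, hmulam, hlam, hTle, hdist, hchar⟩ := pvKey arr start hP h0 h1
  have hmuT : mu < T := by omega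
  have hxmuT : pvX arr start mu = pvX arr start T :=
    (hchar mu T (by omega)).mpr (Or.inr ⟨le_rfl, ⟨1, by omega⟩⟩)
  have hguard : ¬ (start < 0 ∨ start ≥ (arr.length : Int)) := by omega
  -- B side: the visited-set walk returns x T
  have hB : detect_cycle_start_alt arr start = pvX arr start T := by
    simp only [detect_cycle_start_alt]
    rw [if_neg hguard]
    exact pvBLoop_run arr start T hdist ⟨mu, hmuT, hxmuT⟩ hrange 0 (arr.length + 2)
      (by omega) (by omega)
  -- A side: Floyd's meeting index K = least k ≥ 1 with x k = x (2k)
  have hmult : mu + 1 ≤ lam * (mu + 1) := Nat.le_mul_of_pos_left _ hlam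
  have hcand : pvX arr start (lam * (mu + 1)) = pvX arr start (2 * (lam * (mu + 1))) :=
    (hchar _ _ (by omega)).mpr (Or.inr ⟨by omega, ⟨mu + 1, by omega⟩⟩)
  have hexK : ∃ k, 1 ≤ k ∧ pvX arr start k = pvX arr start (2 * k) :=
    ⟨lam * (mu + 1), by omega, hcand⟩
  haveI : DecidablePred (fun k => 1 ≤ k ∧ pvX arr start k = pvX arr start (2 * k)) :=
    fun k => Classical.dec _
  set K := Nat.find hexK with hKdef
  have hKspec := Nat.find_spec hexK
  have hKmin : ∀ k, 1 ≤ k → pvX arr start k = pvX arr start (2 * k) → K ≤ k :=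
    fun k hk1 hk2 => Nat.find_min' hexK ⟨hk1, hk2⟩
  have hdvdK : lam ∣ K := by
    rcases (hchar K (2 * K) (by omega)).mp hKspec.2 with h | ⟨_, h⟩
    · omega
    · rwa [show 2 * K - K = K from by omega] at h
  have hmuK : mu ≤ K := by
    rcases (hchar K (2 * K) (by omega)).mp hKspec.2 with h | ⟨h, _⟩
    · omega
    · exact h
  have hKle : K ≤ arr.length + 1 := by
    rcases Nat.eq_zero_or_pos mu with hmu0 | hmu0
    · have hlc : pvX arr start lam = pvX arr start (2 * lam) :=
        (hchar lam (2 * lam) (by omega)).mpr (Or.inr ⟨by omega, ⟨1, by omega⟩⟩)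
      have := hKmin lam (by omega) hlc
      omega
    · have hdm := Nat.div_add_mod (mu + lam - 1) lam
      have hrlt : (mu + lam - 1) % lam < lam := Nat.mod_lt _ hlam
      have hq1 : mu ≤ lam * ((mu + lam - 1) / lam) := by omega
      have hq2 : lam * ((mu + lam - 1) / lam) ≤ mu + lam - 1 := by omega
      have hqc : pvX arr start (lam * ((mu + lam - 1) / lam))
          = pvX arr start (2 * (lam * ((mu + lam - 1) / lam))) :=
        (hchar _ _ (by omega)).mpr (Or.inr ⟨hq1, ⟨(mu + lam - 1) / lam, by omega⟩⟩)
      have := hKmin _ (by omega) hqc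
      omega
  have hA1 := pvALoop1_run arr start K ⟨hKspec.1, hKspec.2⟩ hKmin hKle hrange 0 (by omega)
  have hA1' : pvALoop1 arr (arr.length : Int) start start 0 0 = (pvX arr start K, 1) := by
    simpa using hA1
  have hiff : ∀ j, pvX arr start j = pvX arr start (K + j) ↔ mu ≤ j := by
    intro j
    constructor
    · intro hcon
      rcases (hchar j (K + j) (by omega)).mp hcon with h | ⟨h, _⟩
      · omega
      · exact h
    · intro hj
      refine (hchar j (K + j) (by omega)).mpr (Or.inr ⟨hj, ?_⟩)
      rwa [show K + j - j = K from by omega]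
  have hA2 := pvALoop2_run arr start mu K hiff hrange 0 (arr.length + 1) (by omega) (by omega)
  have hA2' : pvALoop2 arr (arr.length + 1) start (pvX arr start K) = pvX arr start mu := by
    simpa using hA2
  simp only [detect_cycle_start]
  rw [if_neg hguard, hA1']
  simp only [if_neg (show (1 : Int) ≠ 0 from one_ne_zero)]
  rw [hA2', hB, hxmuT]

-- ===== VERDICT (by name: the statement is the Claim_ definition above) =====
theorem detect_cycle_start_spec : Claim_equal_detect_cycle_start := by
  intro arr start _hD hPre
  unfold Spec_detect_cycle_start
  rcases hPre with h | h | h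
  · simp [detect_cycle_start, detect_cycle_start_alt, h]
  · have h' : start ≥ (arr.length : Int) := h
    simp [detect_cycle_start, detect_cycle_start_alt, h']
  · by_cases hs : start < 0 ∨ start ≥ (arr.length : Int)
    · simp [detect_cycle_start, detect_cycle_start_alt, hs]
    · rw [not_or, not_lt, not_le] at hs
      exact pvMain arr start h hs.1 hs.2
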